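-- pv_equiv track=rewrite | github.com/hbhb0311/Algorithm | Simulation/PRO_Table.py | solution
-- ===== SOURCE A (Python) =====
-- from collections import deque
--
-- def solution(n, k, cmd):
--     deleted = deque()
--     linked_lst = []
--
--     for i in range(n):
--         linked_lst.append([i - 1, i + 1])
--
--     for c in cmd:
--         route = c.split(' ')
--
--         if route[0] == 'U':
--             for _ in range(int(route[1])):
--                 k = linked_lst[k][0]
--
--         elif route[0] == 'D':
--             for _ in range(int(route[1])):
--                 k = linked_lst[k][1]
--
--         elif route[0] == 'C':
--             deleted.append((k, linked_lst[k]))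
--
--             if linked_lst[k][0] != -1:
--                 linked_lst[linked_lst[k][0]][1] = linked_lst[k][1]
--
--             if linked_lst[k][1] != n:
--                 linked_lst[linked_lst[k][1]][0] = linked_lst[k][0]
--
--             if linked_lst[k][1] == n:
--                 k = linked_lst[k][0]
--             else:
--                 k = linked_lst[k][1]
--
--         elif route[0] == 'Z':
--             last = deleted.pop()
--
--             if last[1][1] != n:
--                 linked_lst[last[1][1]][0] = last[0]
--
--             if last[1][0] != -1:
--                 linked_lst[last[1][0]][1] = last[0]
--
--     answer = ['O'] * n
--
--     for d in deleted:
--         answer[d[0]] = 'X'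
--
--     return ''.join(answer)
-- ===== SOURCE B (Python) =====
-- def solution(n, k, cmd):
--     deleted = set()
--     undo = []
--     for c in cmd:
--         t = c.split(' ')
--         if t[0] == 'U':
--             for _ in range(int(t[1])):
--                 k -= 1
--                 while k in deleted:
--                     k -= 1
--         elif t[0] == 'D':
--             for _ in range(int(t[1])):
--                 k += 1
--                 while k in deleted:
--                     k += 1
--         elif t[0] == 'C':
--             undo.append(k)
--             deleted.add(k)
--             j = k + 1
--             while j in deleted:
--                 j += 1
--             if j < n:
--                 k = j
--             else:
--                 j = k - 1
--                 while j in deleted: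
--                     j -= 1
--                 k = j
--         elif t[0] == 'Z':
--             deleted.discard(undo.pop())
--     return ''.join('X' if i in deleted else 'O' for i in range(n))
-- ===== Notes on version B (the rewrite author's own statement) =====
-- stated objective: simpler
-- what changed: A maintains a doubly-linked list of prev/next pointers with explicit pointer surgery on delete/undo; B keeps only a set of deleted row indices plus an undo stack and finds neighbours by scanning indices past deleted rows, so all pointer bookkeeping disappears.
-- outside the precondition, e.g. on solution(2, 0, ['U 1', 'C']): A returns 'OX', B returns 'OO'
import Mathlib
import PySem

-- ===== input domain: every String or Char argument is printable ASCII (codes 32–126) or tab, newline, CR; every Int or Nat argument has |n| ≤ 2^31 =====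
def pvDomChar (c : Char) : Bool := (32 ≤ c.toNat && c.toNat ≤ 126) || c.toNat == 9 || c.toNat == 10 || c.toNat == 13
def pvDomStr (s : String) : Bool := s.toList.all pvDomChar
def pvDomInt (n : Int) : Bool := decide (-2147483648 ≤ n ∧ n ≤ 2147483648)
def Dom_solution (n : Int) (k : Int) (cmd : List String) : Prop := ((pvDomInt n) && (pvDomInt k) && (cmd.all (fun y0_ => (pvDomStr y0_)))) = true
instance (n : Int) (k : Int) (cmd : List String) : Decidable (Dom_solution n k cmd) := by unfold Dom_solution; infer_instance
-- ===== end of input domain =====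

-- B replaces A's hand-maintained doubly-linked list by a deleted-set with index scans: simpler, no pointer surgery.
-- Mutation note: neither program mutates its arguments; the equivalence is about the return value.

-- ===== PORT A =====
-- A's 2-element row lists [prev, next] are ported as pairs (prev, next); the undo deque as a List in push order.
-- Python stores `linked_lst[k]` in the deque by reference; on inputs Pre_ admits no later write touches a deleted
-- row, so capturing the pair by value is exact there.
def aStep (n : Int) (st : List (Int × Int) × List (Int × (Int × Int)) × Int) (c : String) :
    List (Int × Int) × List (Int × (Int × Int)) × Int :=
  let (lst, dels, k) := st
  let route := (PySem.Str.split? c " ").getD []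
  if PySem.List.pyGetD route 0 "" = "U" then
    match PySem.Int.ofStr? (PySem.List.pyGetD route 1 "") with
    | some x => (lst, dels, (List.range x.toNat).foldl (fun kk _ => (PySem.List.pyGetD lst kk ((0:Int),(0:Int))).1) k)
    | none => st   -- int(route[1]) raises ValueError: outside Pre_
  else if PySem.List.pyGetD route 0 "" = "D" then
    match PySem.Int.ofStr? (PySem.List.pyGetD route 1 "") with
    | some x => (lst, dels, (List.range x.toNat).foldl (fun kk _ => (PySem.List.pyGetD lst kk ((0:Int),(0:Int))).2) k)
    | none => st
  else if PySem.List.pyGetD route 0 "" = "C" then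
    let row := PySem.List.pyGetD lst k ((0:Int),(0:Int))
    let dels' := dels ++ [(k, row)]
    let lst1 := if row.1 ≠ -1 then PySem.List.pySetD lst row.1 ((PySem.List.pyGetD lst row.1 ((0:Int),(0:Int))).1, row.2) else lst
    let row1 := PySem.List.pyGetD lst1 k ((0:Int),(0:Int))
    let lst2 := if row1.2 ≠ n then PySem.List.pySetD lst1 row1.2 (row1.1, (PySem.List.pyGetD lst1 row1.2 ((0:Int),(0:Int))).2) else lst1
    let row2 := PySem.List.pyGetD lst2 k ((0:Int),(0:Int))
    (lst2, dels', if row2.2 = n then row2.1 else row2.2)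
  else if PySem.List.pyGetD route 0 "" = "Z" then
    match dels.getLast? with
    | none => st   -- deque.pop() on the empty deque raises IndexError: outside Pre_
    | some last =>
      let lst1 := if last.2.2 ≠ n then PySem.List.pySetD lst last.2.2 (last.1, (PySem.List.pyGetD lst last.2.2 ((0:Int),(0:Int))).2) else lst
      let lst2 := if last.2.1 ≠ -1 then PySem.List.pySetD lst1 last.2.1 ((PySem.List.pyGetD lst1 last.2.1 ((0:Int),(0:Int))).1, last.1) else lst1
      (lst2, dels.dropLast, k)
  else st

def solution (n : Int) (k : Int) (cmd : List String) : String :=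
  let lst0 := (PySem.List.pyRange 0 n 1).foldl (fun l i => l ++ [(i - 1, i + 1)]) []
  let fin := cmd.foldl (aStep n) (lst0, [], k)
  let answer := List.replicate n.toNat "O"
  let answer := fin.2.1.foldl (fun a d => PySem.List.pySetD a d.1 "X") answer
  PySem.Str.join "" answer

-- ===== PORT B =====
-- B's `while j in deleted: j -= 1` scan; it skips at most the distinct members of `deleted`, so a
-- structural counter bounded by `r.length + 1` suffices and the scan exits before it runs out.
def scanDownAux (r : List Int) : Nat → Int → Int
  | 0, j => j
  | c + 1, j => if j ∈ r then scanDownAux r c (j - 1) else j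

def scanDown (r : List Int) (j : Int) : Int := scanDownAux r (r.length + 1) j

def scanUpAux (r : List Int) : Nat → Int → Int
  | 0, j => j
  | c + 1, j => if j ∈ r then scanUpAux r c (j + 1) else j

def scanUp (r : List Int) (j : Int) : Int := scanUpAux r (r.length + 1) j

def bStep (n : Int) (st : Int × PySem.Set Int × List Int) (c : String) : Int × PySem.Set Int × List Int :=
  let (k, del, undo) := st
  let t := (PySem.Str.split? c " ").getD []
  if PySem.List.pyGetD t 0 "" = "U" then
    match PySem.Int.ofStr? (PySem.List.pyGetD t 1 "") with
    | some x => ((List.range x.toNat).foldl (fun kk _ => scanDown del (kk - 1)) k, del, undo)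
    | none => st   -- int(t[1]) raises ValueError: outside Pre_
  else if PySem.List.pyGetD t 0 "" = "D" then
    match PySem.Int.ofStr? (PySem.List.pyGetD t 1 "") with
    | some x => ((List.range x.toNat).foldl (fun kk _ => scanUp del (kk + 1)) k, del, undo)
    | none => st
  else if PySem.List.pyGetD t 0 "" = "C" then
    let undo' := undo ++ [k]
    let del' := PySem.Set.add del k
    let j := scanUp del' (k + 1)
    if j < n then (j, del', undo') else (scanDown del' (k - 1), del', undo')
  else if PySem.List.pyGetD t 0 "" = "Z" then
    match undo.getLast? with
    | none => st   -- list.pop() on the empty list raises IndexError: outside Pre_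
    | some v => (k, PySem.Set.discard del v, undo.dropLast)
  else st

def solution_alt (n : Int) (k : Int) (cmd : List String) : String :=
  let fin := cmd.foldl (bStep n) (k, PySem.Set.ofList [], [])
  PySem.Str.join "" ((PySem.List.pyRange 0 n 1).map (fun i => if i ∈ fin.2.1 then "X" else "O"))

-- ===== PRECONDITION & SPEC =====
-- The first x-fold checks, per single U/D move, that the cursor sits on a live in-range row before it moves.
def stepsOk (n : Int) (r : List Int) (f : Int → Int) (m : Nat) (k : Int) : Option Int :=
  (List.range m).foldl (fun s _ => s.bind (fun kk => if 0 ≤ kk ∧ kk < n ∧ kk ∉ r then some (f kk) else none)) (some k)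

def okStep (n : Int) (st : Option (Int × List Int)) (c : String) : Option (Int × List Int) :=
  match st with
  | none => none
  | some (k, r) =>
    let t := (PySem.Str.split? c " ").getD []
    let h := PySem.List.pyGetD t 0 ""
    if h = "U" then
      match PySem.Int.ofStr? (PySem.List.pyGetD t 1 "") with
      | none => none
      | some x => (stepsOk n r (fun kk => scanDown r (kk - 1)) x.toNat k).map (fun k' => (k', r))
    else if h = "D" then
      match PySem.Int.ofStr? (PySem.List.pyGetD t 1 "") with
      | none => none
      | some x => (stepsOk n r (fun kk => scanUp r (kk + 1)) x.toNat k).map (fun k' => (k', r))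
    else if h = "C" then
      if 0 ≤ k ∧ k < n ∧ k ∉ r then
        let j := scanUp (r ++ [k]) (k + 1)
        some (if j < n then j else scanDown (r ++ [k]) (k - 1), r ++ [k])
      else none
    else if h = "Z" then
      if r.isEmpty then none else some (k, r.dropLast)
    else some (k, r)

-- Pre_ is the standard validity of an editor script: every U/D count parses as an int, the cursor sits on a live
-- in-range row whenever a move or delete uses it, and 'Z' never fires on an empty undo history.  It excludes some
-- inputs on which A still returns: scripts that keep operating after the cursor has run off the table, where
-- Python's negative-index wraparound silently re-enters the list from the other end.
def Pre_solution (n : Int) (k : Int) (cmd : List String) : Prop :=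
  (cmd.foldl (okStep n) (some (k, []))).isSome = true
instance (n : Int) (k : Int) (cmd : List String) : Decidable (Pre_solution n k cmd) := by unfold Pre_solution; infer_instance

def pvWitness_solution : Int × Int × List String := (3, 0, ["D 1", "C", "Z", "U 1", "C"])

def Spec_solution (n : Int) (k : Int) (cmd : List String) (out : String) : Prop := out = solution_alt n k cmd
instance (n : Int) (k : Int) (cmd : List String) (out : String) : Decidable (Spec_solution n k cmd out) := by unfold Spec_solution; infer_instance

-- ===== CLAIM (what is proved, stated in full; the proofs are below) =====
def Claim_equal_solution : Prop := ∀ (n : Int) (k : Int) (cmd : List String), Dom_solution n k cmd → Pre_solution n k cmd → Spec_solution n k cmd (solution n k cmd)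

-- ===== LEMMAS AND PROOFS =====

-- the scan returns the first index ≤ j (resp. ≥ j) that is not a member
lemma scanDownAux_spec : ∀ (c : Nat) (r : List Int) (j : Int),
    (r.dedup.filter (fun x => decide (x ≤ j))).length < c →
    scanDownAux r c j ≤ j ∧ scanDownAux r c j ∉ r ∧ ∀ x, scanDownAux r c j < x → x ≤ j → x ∈ r := by
  intro c
  induction c with
  | zero => intro r j h; omega
  | succ c ih =>
    intro r j h
    by_cases hj : j ∈ r
    · simp only [scanDownAux, if_pos hj]
      have hsub : r.dedup.filter (fun x => decide (x ≤ j - 1))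
          = (r.dedup.filter (fun x => decide (x ≤ j))).filter (fun x => decide (x ≠ j)) := by
        rw [List.filter_filter]
        apply List.filter_congr
        intro x _
        by_cases hx : x ≤ j - 1
        · simp [hx, show x ≤ j by omega, show ¬x = j by omega]
        · by_cases hxj : x = j
          · simp [hx, hxj]
          · simp [hx, hxj, show ¬x ≤ j by omega]
      have hlt : (r.dedup.filter (fun x => decide (x ≤ j - 1))).length
          < (r.dedup.filter (fun x => decide (x ≤ j))).length := by
        rw [hsub]
        apply List.length_filter_lt_length_iff_exists.2
        exact ⟨j, by simp [List.mem_filter, List.mem_dedup, hj], by simp⟩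
      obtain ⟨h1, h2, h3⟩ := ih r (j - 1) (by omega)
      refine ⟨by omega, h2, ?_⟩
      intro x hx hxj
      rcases eq_or_lt_of_le hxj with rfl | hlt2
      · exact hj
      · exact h3 x hx (by omega)
    · simp only [scanDownAux, if_neg hj]
      exact ⟨le_refl _, hj, fun x hx hxj => absurd hxj (by omega)⟩

lemma scanUpAux_spec : ∀ (c : Nat) (r : List Int) (j : Int),
    (r.dedup.filter (fun x => decide (j ≤ x))).length < c →
    j ≤ scanUpAux r c j ∧ scanUpAux r c j ∉ r ∧ ∀ x, j ≤ x → x < scanUpAux r c j → x ∈ r := by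
  intro c
  induction c with
  | zero => intro r j h; omega
  | succ c ih =>
    intro r j h
    by_cases hj : j ∈ r
    · simp only [scanUpAux, if_pos hj]
      have hsub : r.dedup.filter (fun x => decide (j + 1 ≤ x))
          = (r.dedup.filter (fun x => decide (j ≤ x))).filter (fun x => decide (x ≠ j)) := by
        rw [List.filter_filter]
        apply List.filter_congr
        intro x _
        by_cases hx : j + 1 ≤ x
        · simp [hx, show j ≤ x by omega, show ¬x = j by omega]
        · by_cases hxj : x = j
          · simp [hx, hxj]
          · simp [hx, hxj, show ¬j ≤ x by omega]
      have hlt : (r.dedup.filter (fun x => decide (j + 1 ≤ x))).length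
          < (r.dedup.filter (fun x => decide (j ≤ x))).length := by
        rw [hsub]
        apply List.length_filter_lt_length_iff_exists.2
        exact ⟨j, by simp [List.mem_filter, List.mem_dedup, hj], by simp⟩
      obtain ⟨h1, h2, h3⟩ := ih r (j + 1) (by omega)
      refine ⟨by omega, h2, ?_⟩
      intro x hx hxj
      rcases eq_or_lt_of_le hx with rfl | hlt2
      · exact hj
      · exact h3 x (by omega) hxj
    · simp only [scanUpAux, if_neg hj]
      exact ⟨le_refl _, hj, fun x hx hxj => absurd hxj (by omega)⟩

lemma scanDown_spec (r : List Int) (j : Int) :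
    scanDown r j ≤ j ∧ scanDown r j ∉ r ∧ ∀ x, scanDown r j < x → x ≤ j → x ∈ r := by
  apply scanDownAux_spec
  have h1 := List.length_filter_le (fun x => decide (x ≤ j)) r.dedup
  have h2 := r.dedup_sublist.length_le
  omega

lemma scanUp_spec (r : List Int) (j : Int) :
    j ≤ scanUp r j ∧ scanUp r j ∉ r ∧ ∀ x, j ≤ x → x < scanUp r j → x ∈ r := by
  apply scanUpAux_spec
  have h1 := List.length_filter_le (fun x => decide (j ≤ x)) r.dedup
  have h2 := r.dedup_sublist.length_le
  omega

lemma scanDown_eq_iff (r : List Int) (j p : Int) :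
    scanDown r j = p ↔ (p ≤ j ∧ p ∉ r ∧ ∀ x, p < x → x ≤ j → x ∈ r) := by
  constructor
  · rintro rfl; exact scanDown_spec r j
  · rintro ⟨h1, h2, h3⟩
    obtain ⟨s1, s2, s3⟩ := scanDown_spec r j
    rcases lt_trichotomy (scanDown r j) p with h | h | h
    · exact absurd (s3 p h h1) h2
    · exact h
    · exact absurd (h3 _ h s1) s2

lemma scanUp_eq_iff (r : List Int) (j p : Int) :
    scanUp r j = p ↔ (j ≤ p ∧ p ∉ r ∧ ∀ x, j ≤ x → x < p → x ∈ r) := by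
  constructor
  · rintro rfl; exact scanUp_spec r j
  · rintro ⟨h1, h2, h3⟩
    obtain ⟨s1, s2, s3⟩ := scanUp_spec r j
    rcases lt_trichotomy (scanUp r j) p with h | h | h
    · exact absurd (h3 _ s1 h) s2
    · exact h
    · exact absurd (s3 p h1 h) h2

lemma scanDown_ge (r : List Int) (j : Int) (hr : ∀ x ∈ r, 0 ≤ x) (hj : -1 ≤ j) :
    -1 ≤ scanDown r j := by
  obtain ⟨s1, s2, s3⟩ := scanDown_spec r j
  by_contra hlt
  exact absurd (hr _ (s3 (-1) (by omega) (by omega))) (by omega)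

lemma scanUp_le (n : Int) (r : List Int) (j : Int) (hr : ∀ x ∈ r, x < n) (hj : j ≤ n) :
    scanUp r j ≤ n := by
  obtain ⟨s1, s2, s3⟩ := scanUp_spec r j
  by_contra hlt
  exact absurd (hr _ (s3 n hj (by omega))) (by omega)

lemma scanDown_append_lt (r : List Int) (kk j : Int) (hj : j < kk) :
    scanDown (r ++ [kk]) j = scanDown r j := by
  obtain ⟨s1, s2, s3⟩ := scanDown_spec r j
  rw [scanDown_eq_iff]
  refine ⟨s1, ?_, fun x hx hxj => by simp only [List.mem_append]; exact Or.inl (s3 x hx hxj)⟩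
  simp only [List.mem_append, List.mem_singleton]
  rintro (h | h)
  · exact s2 h
  · omega

lemma scanUp_append_gt (r : List Int) (kk j : Int) (hj : kk < j) :
    scanUp (r ++ [kk]) j = scanUp r j := by
  obtain ⟨s1, s2, s3⟩ := scanUp_spec r j
  rw [scanUp_eq_iff]
  refine ⟨s1, ?_, fun x hx hxj => by simp only [List.mem_append]; exact Or.inl (s3 x hx hxj)⟩
  simp only [List.mem_append, List.mem_singleton]
  rintro (h | h)
  · exact s2 h
  · omega

lemma scanUp_insert_prev (r : List Int) (kk : Int) (_hk : kk ∉ r) :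
    scanUp (r ++ [kk]) (scanDown r (kk - 1) + 1) = scanUp r (kk + 1) := by
  obtain ⟨p1, p2, p3⟩ := scanDown_spec r (kk - 1)
  obtain ⟨q1, q2, q3⟩ := scanUp_spec r (kk + 1)
  rw [scanUp_eq_iff]
  refine ⟨by omega, ?_, ?_⟩
  · simp only [List.mem_append, List.mem_singleton]
    rintro (h | h)
    · exact q2 h
    · omega
  · intro x hx1 hx2
    simp only [List.mem_append, List.mem_singleton]
    by_cases hxk : x = kk
    · exact Or.inr hxk
    · rcases lt_or_gt_of_ne hxk with h | h
      · exact Or.inl (p3 x (by omega) (by omega))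
      · exact Or.inl (q3 x (by omega) (by omega))

lemma scanDown_insert_next (r : List Int) (kk : Int) (_hk : kk ∉ r) :
    scanDown (r ++ [kk]) (scanUp r (kk + 1) - 1) = scanDown r (kk - 1) := by
  obtain ⟨p1, p2, p3⟩ := scanDown_spec r (kk - 1)
  obtain ⟨q1, q2, q3⟩ := scanUp_spec r (kk + 1)
  rw [scanDown_eq_iff]
  refine ⟨by omega, ?_, ?_⟩
  · simp only [List.mem_append, List.mem_singleton]
    rintro (h | h)
    · exact p2 h
    · omega
  · intro x hx1 hx2
    simp only [List.mem_append, List.mem_singleton]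
    by_cases hxk : x = kk
    · exact Or.inr hxk
    · rcases lt_or_gt_of_ne hxk with h | h
      · exact Or.inl (p3 x (by omega) (by omega))
      · exact Or.inl (q3 x (by omega) (by omega))

lemma scanDown_of_scanUp (r : List Int) (x : Int) (hx : x ∉ r) :
    scanDown r (scanUp r (x + 1) - 1) = x := by
  obtain ⟨q1, q2, q3⟩ := scanUp_spec r (x + 1)
  rw [scanDown_eq_iff]
  exact ⟨by omega, hx, fun y hy1 hy2 => q3 y (by omega) (by omega)⟩

lemma scanUp_of_scanDown (r : List Int) (x : Int) (hx : x ∉ r) :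
    scanUp r (scanDown r (x - 1) + 1) = x := by
  obtain ⟨p1, p2, p3⟩ := scanDown_spec r (x - 1)
  rw [scanUp_eq_iff]
  exact ⟨by omega, hx, fun y hy1 hy2 => p3 y (by omega) (by omega)⟩

lemma scanDown_unch (r : List Int) (kk i : Int) (_hk : kk ∉ r) (hi : i ∉ r) (hik : i ≠ kk)
    (hiq : i ≠ scanUp r (kk + 1)) :
    scanDown (r ++ [kk]) (i - 1) = scanDown r (i - 1) := by
  rcases lt_or_gt_of_ne hik with h | h
  · exact scanDown_append_lt _ _ _ (by omega)
  · obtain ⟨s1, s2, s3⟩ := scanDown_spec r (i - 1)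
    obtain ⟨q1, q2, q3⟩ := scanUp_spec r (kk + 1)
    have hqi : scanUp r (kk + 1) < i := by
      rcases lt_trichotomy (scanUp r (kk + 1)) i with hh | hh | hh
      · exact hh
      · exact absurd hh.symm hiq
      · exact absurd (q3 i (by omega) hh) hi
    have hsq : scanUp r (kk + 1) ≤ scanDown r (i - 1) := by
      by_contra hlt
      exact q2 (s3 _ (by omega) (by omega))
    rw [scanDown_eq_iff]
    refine ⟨s1, ?_, fun x hx hxj => by simp only [List.mem_append]; exact Or.inl (s3 x hx hxj)⟩
    simp only [List.mem_append, List.mem_singleton]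
    rintro (hh | hh)
    · exact s2 hh
    · omega

lemma scanUp_unch (r : List Int) (kk i : Int) (_hk : kk ∉ r) (hi : i ∉ r) (hik : i ≠ kk)
    (hip : i ≠ scanDown r (kk - 1)) :
    scanUp (r ++ [kk]) (i + 1) = scanUp r (i + 1) := by
  rcases lt_or_gt_of_ne hik with h | h
  · obtain ⟨s1, s2, s3⟩ := scanUp_spec r (i + 1)
    obtain ⟨p1, p2, p3⟩ := scanDown_spec r (kk - 1)
    have hpi : i < scanDown r (kk - 1) := by
      rcases lt_trichotomy i (scanDown r (kk - 1)) with hh | hh | hh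
      · exact hh
      · exact absurd hh hip
      · exact absurd (p3 i hh (by omega)) hi
    have hsp : scanUp r (i + 1) ≤ scanDown r (kk - 1) := by
      by_contra hlt
      exact p2 (s3 _ (by omega) (by omega))
    rw [scanUp_eq_iff]
    refine ⟨s1, ?_, fun x hx hxj => by simp only [List.mem_append]; exact Or.inl (s3 x hx hxj)⟩
    simp only [List.mem_append, List.mem_singleton]
    rintro (hh | hh)
    · exact s2 hh
    · omega
  · exact scanUp_append_gt _ _ _ (by omega)

-- pyGetD after pySetD at in-range Int indices
lemma getD_setD {α : Type} (lst : List α) (i jj : Int) (v d : α)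
    (hi0 : 0 ≤ i) (_hi1 : i < (lst.length : Int)) (hj0 : 0 ≤ jj) (hj1 : jj < (lst.length : Int)) :
    PySem.List.pyGetD (PySem.List.pySetD lst i v) jj d = if jj = i then v else PySem.List.pyGetD lst jj d := by
  rw [PySem.List.pySetD_of_nonneg lst v hi0,
      PySem.List.pyGetD_eq_getElem (lst.set i.toNat v) d hj0 (by simpa using hj1),
      List.getElem_set]
  by_cases h : jj = i
  · rw [if_pos (by omega), if_pos h]
  · rw [if_neg (by omega), if_neg h, PySem.List.pyGetD_eq_getElem lst d hj0 hj1]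



-- the coupling invariant: the linked list stores, for every live row, its scan-neighbours, and the undo
-- stack stores each deleted row with its neighbours at deletion time (r is the deletion-order list)
structure INVS (n : Int) (lst : List (Int × Int)) (dels : List (Int × (Int × Int))) (r : List Int) : Prop where
  hlen : lst.length = n.toNat
  hfst : dels.map Prod.fst = r
  hnd : r.Nodup
  hbd : ∀ i ∈ r, 0 ≤ i ∧ i < n
  hlive : ∀ i : Int, 0 ≤ i → i < n → i ∉ r →
    PySem.List.pyGetD lst i (0, 0) = (scanDown r (i - 1), scanUp r (i + 1))
  hstack : ∀ (t : Nat) (h : t < dels.length),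
    dels[t].2 = (scanDown (r.take t) (dels[t].1 - 1), scanUp (r.take t) (dels[t].1 + 1)) ∧
    PySem.List.pyGetD lst dels[t].1 (0, 0) = dels[t].2

lemma stepsOk_succ (n : Int) (r : List Int) (f : Int → Int) (m : Nat) (k : Int) :
    stepsOk n r f (m + 1) k =
      (stepsOk n r f m k).bind (fun kk => if 0 ≤ kk ∧ kk < n ∧ kk ∉ r then some (f kk) else none) := by
  simp [stepsOk, List.range_succ]

lemma steps_sync (n : Int) (lst : List (Int × Int)) (r : List Int) (g : Int × Int → Int) (f : Int → Int)
    (hlive : ∀ i : Int, 0 ≤ i → i < n → i ∉ r → g (PySem.List.pyGetD lst i (0, 0)) = f i) :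
    ∀ (m : Nat) (k k' : Int), stepsOk n r f m k = some k' →
    (List.range m).foldl (fun kk _ => g (PySem.List.pyGetD lst kk (0, 0))) k = k' ∧
    (List.range m).foldl (fun kk _ => f kk) k = k' := by
  intro m
  induction m with
  | zero => intro k k' h; simp [stepsOk] at h; simp [h]
  | succ m ih =>
    intro k k' h
    rw [stepsOk_succ] at h
    rcases ho : stepsOk n r f m k with _ | km
    · rw [ho] at h; simp at h
    · rw [ho] at h
      simp only [Option.bind_some] at h
      by_cases hc : 0 ≤ km ∧ km < n ∧ km ∉ r
      · rw [if_pos hc] at h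
        obtain ⟨hA, hB⟩ := ih k km ho
        simp only [Option.some.injEq] at h
        constructor
        · rw [List.range_succ, List.foldl_append, hA]
          simp only [List.foldl_cons, List.foldl_nil]
          rw [hlive km hc.1 hc.2.1 hc.2.2]
          exact h
        · rw [List.range_succ, List.foldl_append, hB]
          simpa using h
      · rw [if_neg hc] at h
        exact absurd h (by simp)

lemma foldl_okStep_none (n : Int) (cmds : List String) :
    cmds.foldl (okStep n) none = none := by
  induction cmds with
  | nil => rfl
  | cons c cs ih => simpa [okStep] using ih

-- one command keeps A, B and the validity fold in lock-step
set_option maxHeartbeats 1000000 in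
lemma step_sync (n : Int) (lst : List (Int × Int)) (dels : List (Int × (Int × Int)))
    (k : Int) (r : List Int) (c : String) (k' : Int) (r' : List Int)
    (hI : INVS n lst dels r)
    (hok : okStep n (some (k, r)) c = some (k', r')) :
    ∃ lst' dels', aStep n (lst, dels, k) c = (lst', dels', k') ∧ INVS n lst' dels' r' ∧
      bStep n (k, r, r) c = (k', r', r') := by
  obtain ⟨hlen, hfst, hnd, hbd, hlive, hstack⟩ := hI
  have hrlen : dels.length = r.length := by rw [← hfst, List.length_map]
  have hbdr0 : ∀ x ∈ r, 0 ≤ x := fun x hx => (hbd x hx).1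
  have hbdrn : ∀ x ∈ r, x < n := fun x hx => (hbd x hx).2
  simp only [okStep] at hok
  simp only [aStep, bStep]
  set t := (PySem.Str.split? c " ").getD [] with ht
  by_cases hU : PySem.List.pyGetD t 0 "" = "U"
  · simp only [if_pos hU] at hok ⊢
    rcases hx : PySem.Int.ofStr? (PySem.List.pyGetD t 1 "") with _ | x <;> simp only [hx] at hok ⊢
    · exact absurd hok (by simp)
    · rcases hs : stepsOk n r (fun kk => scanDown r (kk - 1)) x.toNat k with _ | k0 <;>
        rw [hs] at hok
      · exact absurd hok (by simp)
      · simp only [Option.map_some, Option.some.injEq, Prod.mk.injEq] at hok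
        obtain ⟨hk', hr'⟩ := hok
        obtain ⟨hA, hB⟩ := steps_sync n lst r Prod.fst (fun kk => scanDown r (kk - 1))
          (fun i h0 h1 hi => by rw [hlive i h0 h1 hi]) x.toNat k k0 hs
        refine ⟨lst, dels, ?_, ?_, ?_⟩
        · rw [hA, hk']
        · rw [← hr']; exact ⟨hlen, hfst, hnd, hbd, hlive, hstack⟩
        · rw [hB, hk', hr']
  · simp only [if_neg hU] at hok ⊢
    by_cases hD : PySem.List.pyGetD t 0 "" = "D"
    · simp only [if_pos hD] at hok ⊢
      rcases hx : PySem.Int.ofStr? (PySem.List.pyGetD t 1 "") with _ | x <;> simp only [hx] at hok ⊢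
      · exact absurd hok (by simp)
      · rcases hs : stepsOk n r (fun kk => scanUp r (kk + 1)) x.toNat k with _ | k0 <;>
          rw [hs] at hok
        · exact absurd hok (by simp)
        · simp only [Option.map_some, Option.some.injEq, Prod.mk.injEq] at hok
          obtain ⟨hk', hr'⟩ := hok
          obtain ⟨hA, hB⟩ := steps_sync n lst r Prod.snd (fun kk => scanUp r (kk + 1))
            (fun i h0 h1 hi => by rw [hlive i h0 h1 hi]) x.toNat k k0 hs
          refine ⟨lst, dels, ?_, ?_, ?_⟩
          · rw [hA, hk']
          · rw [← hr']; exact ⟨hlen, hfst, hnd, hbd, hlive, hstack⟩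
          · rw [hB, hk', hr']
    · simp only [if_neg hD] at hok ⊢
      by_cases hC : PySem.List.pyGetD t 0 "" = "C"
      · simp only [if_pos hC] at hok ⊢
        by_cases hkl : 0 ≤ k ∧ k < n ∧ k ∉ r
        swap
        · rw [if_neg hkl] at hok; exact absurd hok (by simp)
        · rw [if_pos hkl] at hok
          obtain ⟨hk0, hk1, hk2⟩ := hkl
          have hn0 : 0 < n := by omega
          have hlenZ : (lst.length : Int) = n := by rw [hlen]; omega
          set p := scanDown r (k - 1) with hp
          set q := scanUp r (k + 1) with hq
          have hrow : PySem.List.pyGetD lst k (0, 0) = (p, q) := hlive k hk0 hk1 hk2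
          obtain ⟨hple, hpnr, hpint⟩ := scanDown_spec r (k - 1)
          obtain ⟨hqge, hqnr, hqint⟩ := scanUp_spec r (k + 1)
          have hpm1 : -1 ≤ p := scanDown_ge r (k - 1) hbdr0 (by omega)
          have hqn : q ≤ n := scanUp_le n r (k + 1) hbdrn (by omega)
          -- okStep's scans over r ++ [k] collapse to p and q
          have hqapp : scanUp (r ++ [k]) (k + 1) = q := scanUp_append_gt r k (k + 1) (by omega)
          have hpapp : scanDown (r ++ [k]) (k - 1) = p := scanDown_append_lt r k (k - 1) (by omega)
          rw [hqapp, hpapp] at hok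
          simp only [Option.some.injEq, Prod.mk.injEq] at hok
          obtain ⟨hk', hr'⟩ := hok
          rw [hrow]
          dsimp only
          -- the two conditional writes of A
          set lst1 := (if p ≠ -1 then PySem.List.pySetD lst p ((PySem.List.pyGetD lst p ((0:Int), (0:Int))).1, q) else lst) with hlst1
          have hlen1 : lst1.length = lst.length := by
            rw [hlst1]; split_ifs <;> simp [PySem.List.length_pySetD]
          have hget1 : ∀ jj : Int, 0 ≤ jj → jj < n → jj ≠ p →
              PySem.List.pyGetD lst1 jj (0, 0) = PySem.List.pyGetD lst jj (0, 0) := by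
            intro jj h0 h1 hne
            rw [hlst1]
            by_cases hpe : p = -1
            · rw [if_neg (by simp [hpe])]
            · rw [if_pos hpe, getD_setD lst p jj _ _ (by omega) (by omega) h0 (by omega), if_neg hne]
          have hget1p : p ≠ -1 → PySem.List.pyGetD lst1 p (0, 0) = (scanDown r (p - 1), q) := by
            intro hpe
            rw [hlst1, if_pos hpe, getD_setD lst p p _ _ (by omega) (by omega) (by omega) (by omega),
                if_pos rfl, hlive p (by omega) (by omega) hpnr]
          have hrow1 : PySem.List.pyGetD lst1 k (0, 0) = (p, q) := by
            rw [hget1 k hk0 hk1 (by omega), hrow]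
          rw [hrow1]
          dsimp only
          set lst2 := (if q ≠ n then PySem.List.pySetD lst1 q (p, (PySem.List.pyGetD lst1 q ((0:Int), (0:Int))).2) else lst1) with hlst2
          have hlen2 : lst2.length = lst.length := by
            rw [hlst2]; split_ifs <;> simp [PySem.List.length_pySetD, hlen1]
          have hget2 : ∀ jj : Int, 0 ≤ jj → jj < n → jj ≠ q →
              PySem.List.pyGetD lst2 jj (0, 0) = PySem.List.pyGetD lst1 jj (0, 0) := by
            intro jj h0 h1 hne
            rw [hlst2]
            by_cases hqe : q = n
            · rw [if_neg (by simp [hqe])]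
            · rw [if_pos hqe, getD_setD lst1 q jj _ _ (by omega) (by omega) h0 (by omega), if_neg hne]
          have hget2q : q ≠ n → PySem.List.pyGetD lst2 q (0, 0) = (p, scanUp r (q + 1)) := by
            intro hqe
            rw [hlst2, if_pos hqe, getD_setD lst1 q q _ _ (by omega) (by omega) (by omega) (by omega),
                if_pos rfl, hget1 q (by omega) (by omega) (by omega), hlive q (by omega) (by omega) hqnr]
          have hrow2 : PySem.List.pyGetD lst2 k (0, 0) = (p, q) := by
            rw [hget2 k hk0 hk1 (by omega), hrow1]
          rw [hrow2]
          dsimp only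
          refine ⟨lst2, dels ++ [(k, (p, q))], ?_, ?_, ?_⟩
          · have hkk : (if q = n then p else q) = k' := by
              rw [← hk']
              by_cases hqe : q = n
              · rw [if_pos hqe, if_neg (by omega)]
              · rw [if_neg hqe, if_pos (by omega)]
            rw [hkk]
          · -- INVS for the new state
            rw [← hr']
            have hknr' : (k ∈ r) = False := by simp [hk2]
            refine ⟨by rw [hlen2, hlen], by simp [hfst], ?_, ?_, ?_, ?_⟩
            · simp only [List.nodup_append, List.nodup_singleton, true_and]
              refine ⟨hnd, ?_⟩
              intro a ha b hb
              simp only [List.mem_singleton] at hb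
              subst hb
              exact fun hh => hk2 (hh ▸ ha)
            · intro i hi
              rcases List.mem_append.1 hi with h | h
              · exact hbd i h
              · simp at h; omega
            · intro i hi0 hi1 hi
              have hik : i ≠ k := by simp [List.mem_append] at hi; tauto
              have hir : i ∉ r := by simp [List.mem_append] at hi; tauto
              by_cases hiq : i = q
              · subst hiq
                have h1 : scanDown (r ++ [k]) (q - 1) = p := by
                  rw [hq, scanDown_insert_next r k hk2, ← hp]
                have h2 : scanUp (r ++ [k]) (q + 1) = scanUp r (q + 1) :=
                  scanUp_append_gt r k (q + 1) (by omega)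
                rw [hget2q (by omega), h1, h2]
              · by_cases hip : i = p
                · subst hip
                  have hpe : p ≠ -1 := by omega
                  have h1 : scanDown (r ++ [k]) (p - 1) = scanDown r (p - 1) :=
                    scanDown_append_lt r k (p - 1) (by omega)
                  have h2 : scanUp (r ++ [k]) (p + 1) = q := by
                    rw [hp, scanUp_insert_prev r k hk2, ← hq]
                  rw [hget2 p hi0 hi1 hiq, hget1p hpe, h1, h2]
                · have h1 : scanDown (r ++ [k]) (i - 1) = scanDown r (i - 1) :=
                    scanDown_unch r k i hk2 hir hik (by rw [← hq]; exact hiq)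
                  have h2 : scanUp (r ++ [k]) (i + 1) = scanUp r (i + 1) :=
                    scanUp_unch r k i hk2 hir hik (by rw [← hp]; exact hip)
                  rw [hget2 i hi0 hi1 hiq, hget1 i hi0 hi1 hip, hlive i hi0 hi1 hir, h1, h2]
            · intro u hu
              rw [List.length_append, List.length_singleton] at hu
              by_cases hu1 : u < dels.length
              · have he1 : (dels ++ [(k, (p, q))])[u] = dels[u] := List.getElem_append_left hu1
                rw [he1]
                obtain ⟨hst1, hst2⟩ := hstack u hu1
                have htk : (r ++ [k]).take u = r.take u :=
                  List.take_append_of_le_length (by omega)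
                have he : dels[u].1 ∈ r := by
                  rw [← hfst]
                  exact List.mem_map_of_mem (List.getElem_mem hu1)
                have hebd := hbd _ he
                refine ⟨by rw [htk]; exact hst1, ?_⟩
                rw [hget2 dels[u].1 hebd.1 hebd.2
                      (by intro hh; rw [hh, hq] at he; exact hqnr he),
                    hget1 dels[u].1 hebd.1 hebd.2
                      (by intro hh; rw [hh, hp] at he; exact hpnr he)]
                exact hst2
              · have hu2 : u = dels.length := by omega
                subst hu2
                have he1 : (dels ++ [(k, (p, q))])[dels.length] = (k, (p, q)) := by
                  simp
                rw [he1]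
                have htk : (r ++ [k]).take dels.length = r := by
                  rw [hrlen, List.take_append_of_le_length (le_refl r.length), List.take_length]
                exact ⟨by rw [htk], by rw [hrow2]⟩
          · -- B's step
            have hadd : PySem.Set.add r k = r ++ [k] := by
              simp [PySem.Set.add, hk2]
            rw [hadd, hqapp, hpapp]
            by_cases hqlt : q < n
            · rw [if_pos hqlt, hr', show q = k' by rw [← hk', if_pos hqlt]]
            · rw [if_neg hqlt, hr', show p = k' by rw [← hk', if_neg hqlt]]
      · simp only [if_neg hC] at hok ⊢
        by_cases hZ : PySem.List.pyGetD t 0 "" = "Z"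
        · simp only [if_pos hZ] at hok ⊢
          by_cases hre : r.isEmpty
          · rw [if_pos hre] at hok; exact absurd hok (by simp)
          · rw [if_neg hre] at hok
            simp only [Option.some.injEq, Prod.mk.injEq] at hok
            obtain ⟨hk', hr'⟩ := hok
            have hrne : r ≠ [] := by simpa [List.isEmpty_iff] using hre
            have hdne : dels ≠ [] := by
              intro hh; rw [hh] at hfst; exact hrne (by simpa using hfst.symm)
            have hdlen : 0 < dels.length := List.length_pos_iff.2 hdne
            set m := dels.length - 1 with hm
            have hmlt : m < dels.length := by omega
            have hglast : dels.getLast? = some dels[m] := by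
              rw [List.getLast?_eq_getElem?, List.getElem?_eq_getElem (by omega)]
            rw [hglast]
            dsimp only
            set x := dels[m].1 with hx
            obtain ⟨hst1, hst2⟩ := hstack m hmlt
            have hxr : x ∈ r := by rw [← hfst]; exact List.mem_map_of_mem (List.getElem_mem hmlt)
            have hxbd := hbd x hxr
            have hn0 : 0 < n := by omega
            have hlenZ : (lst.length : Int) = n := by rw [hlen]; omega
            -- r decomposes as r'' ++ [x]
            set r2 := r.dropLast with hr2
            have hg2 : r.getLast? = some x := by
              rw [← hfst, List.getLast?_map, hglast]
              rfl
            have hgl : r.getLast hrne = x := by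
              rw [List.getLast?_eq_some_getLast hrne] at hg2
              exact Option.some_injective _ hg2
            have hrdec : r2 ++ [x] = r := by
              rw [hr2, ← hgl, List.dropLast_append_getLast hrne]
            have htake : r.take m = r2 := by
              rw [hr2, List.dropLast_eq_take]
              congr 1
              omega
            rw [htake] at hst1
            have hxnr2 : x ∉ r2 := by
              have := hnd
              rw [← hrdec] at this
              simp [List.nodup_append] at this
              tauto
            set p := scanDown r2 (x - 1) with hp
            set q := scanUp r2 (x + 1) with hq
            have hlast2 : dels[m].2 = (p, q) := hst1
            rw [hlast2] at hst2 ⊢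
            dsimp only
            obtain ⟨hple, hpnr2, hpint⟩ := scanDown_spec r2 (x - 1)
            obtain ⟨hqge, hqnr2, hqint⟩ := scanUp_spec r2 (x + 1)
            rw [← hp] at hple hpnr2 hpint
            rw [← hq] at hqge hqnr2 hqint
            have hbd2 : ∀ y ∈ r2, 0 ≤ y ∧ y < n := fun y hy => hbd y (by rw [← hrdec]; exact List.mem_append.2 (Or.inl hy))
            have hpm1 : -1 ≤ p := scanDown_ge r2 (x - 1) (fun y hy => (hbd2 y hy).1) (by omega)
            have hqn : q ≤ n := scanUp_le n r2 (x + 1) (fun y hy => (hbd2 y hy).2) (by omega)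
            have hpnr : p ∉ r := by
              rw [← hrdec]; simp [List.mem_append]
              exact ⟨hpnr2, by omega⟩
            have hqnr : q ∉ r := by
              rw [← hrdec]; simp [List.mem_append]
              exact ⟨hqnr2, by omega⟩
            -- A's two conditional writes
            set lst1 := (if q ≠ n then PySem.List.pySetD lst q (x, (PySem.List.pyGetD lst q ((0:Int), (0:Int))).2) else lst) with hlst1
            have hlen1 : lst1.length = lst.length := by
              rw [hlst1]; split_ifs <;> simp [PySem.List.length_pySetD]
            have hget1 : ∀ jj : Int, 0 ≤ jj → jj < n → jj ≠ q →
                PySem.List.pyGetD lst1 jj (0, 0) = PySem.List.pyGetD lst jj (0, 0) := by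
              intro jj h0 h1 hne
              rw [hlst1]
              by_cases hqe : q = n
              · rw [if_neg (by simp [hqe])]
              · rw [if_pos hqe, getD_setD lst q jj _ _ (by omega) (by omega) h0 (by omega), if_neg hne]
            have hget1q : q ≠ n → PySem.List.pyGetD lst1 q (0, 0) = (x, scanUp r (q + 1)) := by
              intro hqe
              rw [hlst1, if_pos hqe, getD_setD lst q q _ _ (by omega) (by omega) (by omega) (by omega),
                  if_pos rfl, hlive q (by omega) (by omega) hqnr]
            set lst2 := (if p ≠ -1 then PySem.List.pySetD lst1 p ((PySem.List.pyGetD lst1 p ((0:Int), (0:Int))).1, x) else lst1) with hlst2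
            have hlen2 : lst2.length = lst.length := by
              rw [hlst2]; split_ifs <;> simp [PySem.List.length_pySetD, hlen1]
            have hget2 : ∀ jj : Int, 0 ≤ jj → jj < n → jj ≠ p →
                PySem.List.pyGetD lst2 jj (0, 0) = PySem.List.pyGetD lst1 jj (0, 0) := by
              intro jj h0 h1 hne
              rw [hlst2]
              by_cases hpe : p = -1
              · rw [if_neg (by simp [hpe])]
              · rw [if_pos hpe, getD_setD lst1 p jj _ _ (by omega) (by omega) h0 (by omega), if_neg hne]
            have hget2p : p ≠ -1 → PySem.List.pyGetD lst2 p (0, 0) = (scanDown r (p - 1), x) := by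
              intro hpe
              rw [hlst2, if_pos hpe, getD_setD lst1 p p _ _ (by omega) (by omega) (by omega) (by omega),
                  if_pos rfl, hget1 p (by omega) (by omega) (by omega), hlive p (by omega) (by omega) hpnr]
            refine ⟨lst2, dels.dropLast, ?_, ?_, ?_⟩
            · rw [hk']
            · -- INVS for the restored state
              rw [← hr']
              have hfst2 : dels.dropLast.map Prod.fst = r2 := by
                rw [hr2, List.dropLast_eq_take, List.dropLast_eq_take, List.map_take, hfst, hrlen]
              have hnd2 : r2.Nodup := by
                have := hnd; rw [← hrdec] at this
                exact (List.nodup_append.1 this).1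
              refine ⟨by rw [hlen2, hlen], hfst2, hnd2, hbd2, ?_, ?_⟩
              · intro i hi0 hi1 hi
                by_cases hix : i = x
                · subst hix
                  rw [hget2 x hi0 hi1 (by omega), hget1 x hi0 hi1 (by omega), hst2]
                · have hir : i ∉ r := by
                    rw [← hrdec]; simp [List.mem_append]; exact ⟨hi, hix⟩
                  by_cases hiq : i = q
                  · subst hiq
                    have hqe : q ≠ n := by omega
                    have h1 : scanDown r2 (q - 1) = x := by
                      rw [hq, scanDown_of_scanUp r2 x hxnr2]
                    have h2 : scanUp r2 (q + 1) = scanUp r (q + 1) := by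
                      conv_rhs => rw [← hrdec]
                      exact (scanUp_append_gt r2 x (q + 1) (by omega)).symm
                    rw [hget2 q hi0 hi1 (by omega), hget1q hqe, h1, h2]
                  · by_cases hip : i = p
                    · subst hip
                      have hpe : p ≠ -1 := by omega
                      have h1 : scanDown r2 (p - 1) = scanDown r (p - 1) := by
                        conv_rhs => rw [← hrdec]
                        exact (scanDown_append_lt r2 x (p - 1) (by omega)).symm
                      have h2 : scanUp r2 (p + 1) = x := by
                        rw [hp, scanUp_of_scanDown r2 x hxnr2]
                      rw [hget2p hpe, h1, h2]
                    · have h1 : scanDown r2 (i - 1) = scanDown r (i - 1) := by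
                        conv_rhs => rw [← hrdec]
                        exact (scanDown_unch r2 x i hxnr2 hi hix (by rw [← hq]; exact hiq)).symm
                      have h2 : scanUp r2 (i + 1) = scanUp r (i + 1) := by
                        conv_rhs => rw [← hrdec]
                        exact (scanUp_unch r2 x i hxnr2 hi hix (by rw [← hp]; exact hip)).symm
                      rw [hget2 i hi0 hi1 hip, hget1 i hi0 hi1 hiq, hlive i hi0 hi1 hir, h1, h2]
              · intro u hu
                rw [List.length_dropLast] at hu
                have hu1 : u < dels.length := by omega
                have he1 : dels.dropLast[u]'(by rw [List.length_dropLast]; omega) = dels[u]'hu1 := by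
                  simp
                rw [he1]
                obtain ⟨hs1, hs2⟩ := hstack u hu1
                have htk2 : r2.take u = r.take u := by
                  rw [hr2, List.dropLast_eq_take, List.take_take]
                  congr 1
                  omega
                have he : dels[u].1 ∈ r2 := by
                  rw [← hfst2]
                  have : dels.dropLast[u] = dels[u] := he1
                  rw [← this]
                  exact List.mem_map_of_mem (List.getElem_mem (by rw [List.length_dropLast]; omega))
                have hebd := hbd2 _ he
                refine ⟨by rw [htk2]; exact hs1, ?_⟩
                rw [hget2 dels[u].1 hebd.1 hebd.2
                      (by intro hh; rw [hh] at he; exact hpnr2 he),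
                    hget1 dels[u].1 hebd.1 hebd.2
                      (by intro hh; rw [hh] at he; exact hqnr2 he)]
                exact hs2
            · -- B's step
              have hglast2 : (r : List Int).getLast? = some x := by
                conv_lhs => rw [← hrdec]
                simp
              rw [hglast2]
              dsimp only
              have hdisc : PySem.Set.discard r x = r2 := by
                conv_lhs => rw [← hrdec]
                rw [PySem.Set.discard, List.filter_append]
                have h1 : r2.filter (fun y => !y == x) = r2 :=
                  List.filter_eq_self.2 (fun y hy => by
                    have hne : y ≠ x := fun hh => hxnr2 (hh ▸ hy)
                    simpa using hne)
                have h2 : [x].filter (fun y => !y == x) = [] := by simp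
                rw [h1, h2, List.append_nil]
              rw [hdisc, hk', hr']
        · simp only [if_neg hZ] at hok ⊢
          simp only [Option.some.injEq, Prod.mk.injEq] at hok
          obtain ⟨hk', hr'⟩ := hok
          exact ⟨lst, dels, by rw [hk'], by rw [← hr']; exact ⟨hlen, hfst, hnd, hbd, hlive, hstack⟩,
            by rw [hk', hr']⟩

lemma run_sync (n : Int) : ∀ (cmds : List String) (lst : List (Int × Int))
    (dels : List (Int × (Int × Int))) (k : Int) (r : List Int),
    INVS n lst dels r →
    ∀ (kf : Int) (rf : List Int), cmds.foldl (okStep n) (some (k, r)) = some (kf, rf) →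
    ∃ lst' dels', cmds.foldl (aStep n) (lst, dels, k) = (lst', dels', kf) ∧ INVS n lst' dels' rf ∧
      cmds.foldl (bStep n) (k, r, r) = (kf, rf, rf) := by
  intro cmds
  induction cmds with
  | nil =>
    intro lst dels k r hI kf rf h
    simp only [List.foldl_nil, Option.some.injEq, Prod.mk.injEq] at h
    exact ⟨lst, dels, by simp [h.1], h.2 ▸ hI, by simp [h.1, h.2]⟩
  | cons c cs ih =>
    intro lst dels k r hI kf rf h
    rw [List.foldl_cons] at h
    rcases ho : okStep n (some (k, r)) c with _ | ⟨k1, r1⟩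
    · rw [ho] at h; rw [foldl_okStep_none] at h; exact absurd h (by simp)
    · rw [ho] at h
      obtain ⟨lst1, dels1, hA1, hI1, hB1⟩ := step_sync n lst dels k r c k1 r1 hI ho
      obtain ⟨lst', dels', hA, hI', hB⟩ := ih lst1 dels1 k1 r1 hI1 kf rf h
      exact ⟨lst', dels', by rw [List.foldl_cons, hA1]; exact hA, hI',
        by rw [List.foldl_cons, hB1]; exact hB⟩

-- rendering: A's O-list with X written at every deleted index equals the membership map
lemma renderA (n : Int) : ∀ (ds : List (Int × (Int × Int))) (S : Nat → Bool),
    (∀ d ∈ ds, 0 ≤ d.1 ∧ d.1 < n) →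
    ds.foldl (fun a d => PySem.List.pySetD a d.1 "X")
        ((List.range n.toNat).map (fun i => if S i then "X" else "O"))
      = (List.range n.toNat).map
          (fun i => if (S i || decide ((i : Int) ∈ ds.map Prod.fst)) then "X" else "O") := by
  intro ds
  induction ds with
  | nil => intro S _; simp
  | cons d ds ih =>
    intro S hbd
    rw [List.foldl_cons]
    have hset : PySem.List.pySetD ((List.range n.toNat).map (fun i => if S i then "X" else "O")) d.1 "X"
        = (List.range n.toNat).map (fun i => if (S i || decide ((i : Int) = d.1)) then "X" else "O") := by
      obtain ⟨hd0, hd1⟩ := hbd d (by simp)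
      rw [PySem.List.pySetD_of_nonneg _ _ hd0]
      apply List.ext_getElem
      · simp
      · intro i h1 h2
        simp only [List.getElem_set, List.getElem_map, List.getElem_range]
        have hi : i < n.toNat := by simpa using h2
        by_cases h : (i : Int) = d.1
        · rw [if_pos (by omega)]
          simp [h]
        · rw [if_neg (by omega)]
          simp [h]
    rw [hset, ih (fun i => S i || decide ((i : Int) = d.1)) (fun x hx => hbd x (by simp [hx]))]
    apply List.map_congr_left
    intro i _
    by_cases h1 : (i : Int) = d.1 <;> by_cases h2 : (i : Int) ∈ ds.map Prod.fst <;>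
      simp [h1, h2]

lemma pyRangeInt (n : Int) : PySem.List.pyRange 0 n 1 = (List.range n.toNat).map (Nat.cast : Nat → Int) := by
  by_cases h : 0 ≤ n
  · have : n = ((n.toNat : Nat) : Int) := by omega
    rw [this, PySem.List.pyRange_zero_natCast]
    congr 1
  · have h1 : n.toNat = 0 := by omega
    rw [h1]
    simp [PySem.List.pyRange]
    omega

lemma scanDown_nil (j : Int) : scanDown [] j = j := by
  simp [scanDown, scanDownAux]

lemma scanUp_nil (j : Int) : scanUp [] j = j := by
  simp [scanUp, scanUpAux]

-- ===== VERDICT (by name: the statement is the Claim_ definition above) =====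
theorem solution_spec : Claim_equal_solution := by
  unfold Claim_equal_solution
  intro n k cmd _ hpre
  unfold Spec_solution solution solution_alt
  dsimp only
  unfold Pre_solution at hpre
  rcases hrun : cmd.foldl (okStep n) (some (k, [])) with _ | ⟨kf, rf⟩
  · rw [hrun] at hpre; simp at hpre
  · have hlst0 : (PySem.List.pyRange 0 n 1).foldl (fun l i => l ++ [(i - 1, i + 1)]) ([] : List (Int × Int))
        = (PySem.List.pyRange 0 n 1).map (fun i => (i - 1, i + 1)) := by
      simpa using PySem.List.foldl_append_singleton_eq_map (fun i : Int => (i - 1, i + 1)) (PySem.List.pyRange 0 n 1) []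
    have hI0 : INVS n ((PySem.List.pyRange 0 n 1).map (fun i => (i - 1, i + 1))) [] [] := by
      refine ⟨?_, rfl, List.nodup_nil, by simp, ?_, by simp⟩
      · rw [pyRangeInt]; simp
      · intro i h0 h1 _
        rw [PySem.List.pyGetD_map_pyRange_of_nonneg (fun i => (i - 1, i + 1)) n i (0, 0) h0 h1,
            scanDown_nil, scanUp_nil]
    obtain ⟨lst', dels', hA, hI', hB⟩ := run_sync n cmd _ [] k [] hI0 kf rf hrun
    have hBB : cmd.foldl (bStep n) (k, PySem.Set.ofList [], []) = (kf, rf, rf) := hB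
    rw [hlst0, hA, hBB]
    dsimp only
    have hrep : List.replicate n.toNat "O"
        = (List.range n.toNat).map (fun i => if (fun (_ : Nat) => false) i then "X" else "O") := by
      simp
    have hbds : ∀ d ∈ dels', 0 ≤ d.1 ∧ d.1 < n := by
      intro d hd
      exact hI'.hbd d.1 (hI'.hfst ▸ List.mem_map_of_mem hd)
    rw [hrep, renderA n dels' (fun _ => false) hbds, pyRangeInt n, List.map_map]
    congr 1
    apply List.map_congr_left
    intro i _
    simp only [Bool.false_or, Function.comp]
    rw [hI'.hfst]
    by_cases hm : (i : Int) ∈ rf <;> simp [hm]
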